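-- pv_equiv track=rewrite | github.com/cirosantilli/project-euler-solvers | solvers/77.py | count_prime_summations
-- ===== SOURCE A (Python) =====
-- from typing import List
--
-- def count_prime_summations(n: int, primes: List[int]) -> int:
--     """
--     Number of unordered ways to write n as a sum of primes.
--     Standard coin-change DP: each prime can be used unlimited times, order doesn't matter.
--     """
--     ways = [0] * (n + 1)
--     ways[0] = 1
--     for p in primes:
--         if p > n:
--             break
--         for s in range(p, n + 1):
--             ways[s] += ways[s - p]
--     return ways[n]
-- ===== SOURCE B (Python) =====
-- def count_prime_summations(n, primes):
--     """
--     Top-down counting over the usable prime prefix (primes up to the first one > n):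
--     count(i, rem) = ways to write rem as a sum of usable[0..i] (each unlimited).
--     Memoized recursion, run through a generator trampoline so deep rem-chains
--     do not hit the interpreter recursion limit.
--     """
--     usable = []
--     for p in primes:
--         if p > n:
--             break
--         usable.append(p)
--
--     def count(i, rem):
--         # generator form of the recursion: 'yield key' asks for count(*key)
--         if rem == 0:
--             return 1
--         if i < 0:
--             return 0
--         r = yield (i - 1, rem)
--         p = usable[i]
--         if p <= rem:
--             r += yield (i, rem - p)
--         return r
--
--     memo = {}
--
--     def run(key):
--         stack = [(key, count(*key))]
--         ret = None
--         while stack: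
--             k, gen = stack[-1]
--             try:
--                 sub = gen.send(ret)
--             except StopIteration as done:
--                 memo[k] = done.value
--                 ret = done.value
--                 stack.pop()
--                 continue
--             if sub in memo:
--                 ret = memo[sub]
--             else:
--                 stack.append((sub, count(*sub)))
--                 ret = None
--         return ret
--
--     return run((len(usable) - 1, n))
-- ===== Notes on version B (the rewrite author's own statement) =====
-- stated objective: alternative
-- what changed: Replaces A's bottom-up coin-change table (outer loop over primes, inner loop filling ways[0..n] in place) with a top-down memoized recursion count(i, rem) over the usable prime prefix, evaluated by a generator trampoline.
-- outside the precondition, e.g. on count_prime_summations(0, [0]): A returns 2, B returns 1; on count_prime_summations(2, [0]): A returns 0, B does not finish within the time limit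
import Mathlib
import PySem

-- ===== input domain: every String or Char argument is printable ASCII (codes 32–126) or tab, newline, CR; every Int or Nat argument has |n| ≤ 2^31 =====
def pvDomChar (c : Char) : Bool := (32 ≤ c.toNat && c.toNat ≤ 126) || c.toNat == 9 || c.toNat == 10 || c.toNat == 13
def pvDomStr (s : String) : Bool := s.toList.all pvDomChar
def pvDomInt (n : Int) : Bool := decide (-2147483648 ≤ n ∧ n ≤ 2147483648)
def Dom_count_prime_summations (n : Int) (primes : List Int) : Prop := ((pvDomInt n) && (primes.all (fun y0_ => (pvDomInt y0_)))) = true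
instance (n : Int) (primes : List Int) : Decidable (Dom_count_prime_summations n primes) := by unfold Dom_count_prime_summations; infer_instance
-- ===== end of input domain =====

-- B replaces A's bottom-up coin-change table by a top-down memoized recursion over the
-- usable prime prefix (objective: alternative decomposition, no speed claim).

-- ===== PORT A =====
-- 'ways[s] += ways[s - p]' for one s (Python list read/write)
def pvInnerStep (p : Int) (w : List Int) (s : Int) : List Int :=
  PySem.List.pySetD w s (PySem.List.pyGetD w s 0 + PySem.List.pyGetD w (s - p) 0)

-- 'for s in range(p, n + 1): ways[s] += ways[s - p]'
def pvInnerLoop (n p : Int) (w : List Int) : List Int :=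
  (PySem.List.pyRange p (n + 1) 1).foldl (pvInnerStep p) w

-- 'for p in primes: if p > n: break; <inner loop>'
def pvOuterLoop (n : Int) : List Int → List Int → List Int
  | [], w => w
  | p :: ps, w => if p > n then w else pvOuterLoop n ps (pvInnerLoop n p w)

def count_prime_summations (n : Int) (primes : List Int) : Int :=
  let ways := (List.replicate (n + 1).toNat 0).set 0 1
  PySem.List.pyGetD (pvOuterLoop n primes ways) n 0

-- ===== PORT B =====
-- 'usable = []; for p in primes: if p > n: break; usable.append(p)'
def pvUsable (n : Int) : List Int → List Int
  | [] => []
  | p :: ps => if p > n then [] else p :: pvUsable n ps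

-- the recursion 'count(i, rem)' that Source B's memoized trampoline evaluates (fuel only makes
-- it total in Lean; the starting fuel below exceeds the recursion depth on every Pre_ input)
def pvAltCount (usable : List Int) : Nat → Int → Int → Int
  | 0, _, _ => 0
  | fuel + 1, i, rem =>
    if rem = 0 then 1
    else if i < 0 then 0
    else
      let p := PySem.List.pyGetD usable i 0
      pvAltCount usable fuel (i - 1) rem +
        (if p ≤ rem then pvAltCount usable fuel i (rem - p) else 0)

def count_prime_summations_alt (n : Int) (primes : List Int) : Int :=
  let usable := pvUsable n primes
  pvAltCount usable ((n.toNat + 1) * (usable.length + 1)) ((usable.length : Int) - 1) n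

-- ===== PRECONDITION & SPEC =====
-- Pre_ keeps the natural domain: n ≥ 0 and every prime before the first one > n positive.
-- It excludes n < 0 and negative prefix entries (A raises IndexError there), and prefix
-- entries equal to 0, where A's doubling value is accidental for a primes list and B diverges.
def Pre_count_prime_summations (n : Int) (primes : List Int) : Prop :=
  0 ≤ n ∧ ∀ p ∈ primes.takeWhile (fun p => decide (p ≤ n)), 1 ≤ p
instance (n : Int) (primes : List Int) : Decidable (Pre_count_prime_summations n primes) := by
  unfold Pre_count_prime_summations; infer_instance

def pvWitness_count_prime_summations : Int × List Int := (7, [2, 3, 11, 5])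

def Spec_count_prime_summations (n : Int) (primes : List Int) (out : Int) : Prop := out = count_prime_summations_alt n primes
instance (n : Int) (primes : List Int) (out : Int) : Decidable (Spec_count_prime_summations n primes out) := by unfold Spec_count_prime_summations; infer_instance

-- ===== CLAIM (what is proved, stated in full; the proofs are below) =====
def Claim_equal_count_prime_summations : Prop := ∀ (n : Int) (primes : List Int), Dom_count_prime_summations n primes → Pre_count_prime_summations n primes → Spec_count_prime_summations n primes (count_prime_summations n primes)

-- ===== LEMMAS AND PROOFS =====

-- ideal count: pvG m l = number of multisets over l summing to m (head-peeling recursion)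
def pvG : Int → List Int → Int
  | m, [] => if m = 0 then 1 else 0
  | m, p :: ps =>
    pvG m ps + (if _h : 1 ≤ p ∧ p ≤ m then pvG (m - p) (p :: ps) else 0)
termination_by m ps => (m.toNat, ps.length)
decreasing_by
  · exact Prod.Lex.right _ (by simp)
  · exact Prod.Lex.left _ _ (by omega)

theorem pvG_zero (l : List Int) (h : ∀ p ∈ l, 1 ≤ p) : pvG 0 l = 1 := by
  induction l with
  | nil => simp [pvG]
  | cons p ps ih =>
    rw [pvG]
    have hp : ¬ (1 ≤ p ∧ p ≤ 0) := by have := h p (by simp); omega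
    rw [dif_neg hp, ih (fun q hq => h q (by simp [hq]))]
    omega

-- reading after writing, both with nonnegative in-range Int indices
theorem pv_wget_set (w : List Int) (a s v : Int) (h0a : 0 ≤ a) (_ha : a < (w.length : Int))
    (h0s : 0 ≤ s) (hs : s < (w.length : Int)) :
    PySem.List.pyGetD (PySem.List.pySetD w a v) s 0 =
      if s = a then v else PySem.List.pyGetD w s 0 := by
  rw [PySem.List.pySetD_of_nonneg w v h0a,
      PySem.List.pyGetD_eq_getElem _ _ h0s (by simpa using hs),
      PySem.List.pyGetD_eq_getElem _ _ h0s hs]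
  rw [List.getElem_set]
  by_cases h : s = a
  · simp [h]
  · have hne : a.toNat ≠ s.toNat := by omega
    simp [hne, h]

-- characterization of the inner loop from start index a
theorem pv_inner_partial (n p : Int) (hp : 1 ≤ p) :
    ∀ (k : Nat) (a : Int) (w : List Int), (n + 1 - a).toNat = k → p ≤ a →
      w.length = (n + 1).toNat →
      (((PySem.List.pyRange a (n + 1) 1).foldl (pvInnerStep p) w).length = (n + 1).toNat ∧
       (∀ s : Int, 0 ≤ s → s ≤ n → s < a →
         PySem.List.pyGetD ((PySem.List.pyRange a (n + 1) 1).foldl (pvInnerStep p) w) s 0 =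
           PySem.List.pyGetD w s 0) ∧
       (∀ s : Int, a ≤ s → s ≤ n →
         PySem.List.pyGetD ((PySem.List.pyRange a (n + 1) 1).foldl (pvInnerStep p) w) s 0 =
           PySem.List.pyGetD w s 0 +
             PySem.List.pyGetD ((PySem.List.pyRange a (n + 1) 1).foldl (pvInnerStep p) w) (s - p) 0)) := by
  intro k
  induction k with
  | zero =>
    intro a w hk hpa hw
    have hna : n + 1 ≤ a := by omega
    rw [PySem.List.pyRange_one_eq_nil hna]
    refine ⟨by simpa using hw, fun s h0 h1 h2 => rfl, fun s h1 h2 => by omega⟩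
  | succ k ih =>
    intro a w hk hpa hw
    have han : a < n + 1 := by omega
    rw [PySem.List.pyRange_one_cons han]
    simp only [List.foldl_cons]
    set w' := pvInnerStep p w a with hw'
    have hlw' : w'.length = (n + 1).toNat := by
      simp [hw', pvInnerStep, PySem.List.length_pySetD, hw]
    obtain ⟨L1, L2, L3⟩ := ih (a + 1) w' (by omega) (by omega) hlw'
    have hbound : ∀ s : Int, 0 ≤ s → s ≤ n → s < (w.length : Int) := by
      intro s h0 h1; rw [hw]; omega
    have ha0 : 0 ≤ a := by omega
    have hget : ∀ s : Int, 0 ≤ s → s ≤ n → s ≠ a →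
        PySem.List.pyGetD w' s 0 = PySem.List.pyGetD w s 0 := by
      intro s h0 h1 hne
      rw [hw', pvInnerStep, pv_wget_set w a s _ ha0 (hbound a ha0 (by omega)) h0 (hbound s h0 h1)]
      simp [hne]
    have hgeta : PySem.List.pyGetD w' a 0 =
        PySem.List.pyGetD w a 0 + PySem.List.pyGetD w (a - p) 0 := by
      rw [hw', pvInnerStep, pv_wget_set w a a _ ha0 (hbound a ha0 (by omega)) ha0 (hbound a ha0 (by omega))]
      simp
    refine ⟨L1, ?_, ?_⟩
    · intro s h0 h1 h2
      rw [L2 s h0 h1 (by omega), hget s h0 h1 (by omega)]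
    · intro s h1 h2
      by_cases hsa : s = a
      · subst hsa
        rw [L2 s ha0 h2 (by omega), hgeta,
            L2 (s - p) (by omega) (by omega) (by omega),
            hget (s - p) (by omega) (by omega) (by omega)]
      · have hs1 : a + 1 ≤ s := by omega
        rw [L3 s hs1 h2, hget s (by omega) h2 hsa]

-- the initial row: 1 at index 0, else 0
theorem pv_w0_get (n : Int) (_hn : 0 ≤ n) (m : Int) (h0 : 0 ≤ m) (h1 : m ≤ n) :
    PySem.List.pyGetD ((List.replicate (n + 1).toNat (0 : Int)).set 0 1) m 0 = if m = 0 then 1 else 0 := by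
  rw [PySem.List.pyGetD_eq_getElem _ _ h0 (by simp; omega)]
  rw [List.getElem_set]
  by_cases h : m = 0
  · simp [h]
  · have hne : (0 : Nat) ≠ m.toNat := by omega
    simp [hne, h, List.getElem_replicate]

-- A's table after processing the whole list q equals pvG on q reversed
theorem pv_fold_G (n : Int) (hn : 0 ≤ n) :
    ∀ (q : List Int), (∀ p ∈ q, 1 ≤ p ∧ p ≤ n) →
      ((q.foldl (fun w p => pvInnerLoop n p w) ((List.replicate (n + 1).toNat 0).set 0 1)).length
          = (n + 1).toNat ∧
       ∀ m : Int, 0 ≤ m → m ≤ n →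
         PySem.List.pyGetD (q.foldl (fun w p => pvInnerLoop n p w)
             ((List.replicate (n + 1).toNat 0).set 0 1)) m 0 = pvG m q.reverse) := by
  intro q
  induction q using List.reverseRecOn with
  | nil =>
    intro _
    refine ⟨by simp, fun m h0 h1 => ?_⟩
    rw [List.foldl_nil, show pvG m [].reverse = if m = 0 then 1 else 0 from by
      rw [List.reverse_nil, pvG]]
    exact pv_w0_get n hn m h0 h1
  | append_singleton q p ihq =>
    intro hq
    have hp : 1 ≤ p := (hq p (by simp)).1
    have hpn : p ≤ n := (hq p (by simp)).2
    obtain ⟨ihlen, ihval⟩ := ihq (fun r hr => hq r (by simp [hr]))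
    rw [List.foldl_append]
    simp only [List.foldl_cons, List.foldl_nil]
    rw [pvInnerLoop]
    obtain ⟨L1, L2, L3⟩ :=
      pv_inner_partial n p hp (n + 1 - p).toNat p _ rfl le_rfl ihlen
    refine ⟨L1, ?_⟩
    have hrv : (q ++ [p]).reverse = p :: q.reverse := by simp
    have key : ∀ (t : Nat) (m : Int), m.toNat ≤ t → 0 ≤ m → m ≤ n →
        PySem.List.pyGetD ((PySem.List.pyRange p (n + 1) 1).foldl (pvInnerStep p)
            (q.foldl (fun w p => pvInnerLoop n p w)
              ((List.replicate (n + 1).toNat 0).set 0 1))) m 0 =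
          pvG m (p :: q.reverse) := by
      intro t
      induction t with
      | zero =>
        intro m hmt h0 h1
        have hm0 : m = 0 := by omega
        subst hm0
        rw [pvG, dif_neg (by omega), L2 0 le_rfl hn (by omega), ihval 0 le_rfl hn]
        omega
      | succ t iht =>
        intro m hmt h0 h1
        rw [pvG]
        by_cases hpm : p ≤ m
        · rw [dif_pos ⟨hp, hpm⟩, L3 m hpm h1, ihval m h0 h1,
              iht (m - p) (by omega) (by omega) (by omega)]
        · rw [dif_neg (by omega), L2 m h0 h1 (by omega), ihval m h0 h1]
          omega
    intro m h0 h1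
    rw [hrv]
    exact key m.toNat m le_rfl h0 h1

-- B's fueled recursion computes pvG on the reversed take-prefix
theorem pv_altCount_G (u : List Int) (hu : ∀ p ∈ u, 1 ≤ p) :
    ∀ (fuel : Nat) (i rem : Int), 0 ≤ rem → i < (u.length : Int) →
      (i + 1).toNat + rem.toNat * (u.length + 1) < fuel →
      pvAltCount u fuel i rem = pvG rem ((u.take (i + 1).toNat).reverse) := by
  intro fuel
  induction fuel with
  | zero => intro i rem _ _ h; omega
  | succ fuel ih =>
    intro i rem hrem hi hfuel
    rw [pvAltCount]
    by_cases h0 : rem = 0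
    · subst h0
      rw [if_pos rfl, pvG_zero]
      intro r hr
      exact hu r (List.mem_of_mem_take (List.mem_reverse.mp hr))
    · rw [if_neg h0]
      by_cases hineg : i < 0
      · rw [if_pos hineg]
        have : (i + 1).toNat = 0 := by omega
        rw [this]
        simp only [List.take_zero, List.reverse_nil]
        rw [pvG, if_neg h0]
      · rw [if_neg hineg]
        have h0i : 0 ≤ i := by omega
        have hilen : i.toNat < u.length := by omega
        have hpget : PySem.List.pyGetD u i 0 = u[i.toNat] :=
          PySem.List.pyGetD_eq_getElem u 0 h0i hi
        have hp : 1 ≤ u[i.toNat] := hu _ (List.getElem_mem hilen)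
        have htake : (i + 1).toNat = i.toNat + 1 := by omega
        have hsplit : u.take (i.toNat + 1) = u.take i.toNat ++ [u[i.toNat]] := by
          rw [List.take_add_one]
          simp [List.getElem?_eq_getElem hilen]
        have hrev : (u.take (i + 1).toNat).reverse =
            u[i.toNat] :: (u.take i.toNat).reverse := by
          rw [htake, hsplit]; simp
        have ih1 : pvAltCount u fuel (i - 1) rem = pvG rem ((u.take i.toNat).reverse) := by
          have : (i - 1 + 1).toNat = i.toNat := by omega
          rw [ih (i - 1) rem hrem (by omega) (by rw [this]; omega), this]
        rw [hpget, ih1, hrev, pvG]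
        simp only []
        by_cases hpr : u[i.toNat] ≤ rem
        · rw [if_pos hpr, dif_pos ⟨hp, hpr⟩]
          have hmul : ((rem - u[i.toNat]).toNat + 1) * (u.length + 1) ≤ rem.toNat * (u.length + 1) :=
            Nat.mul_le_mul_right _ (by omega)
          have ih2 : pvAltCount u fuel i (rem - u[i.toNat]) =
              pvG (rem - u[i.toNat]) ((u.take (i + 1).toNat).reverse) := by
            refine ih i (rem - u[i.toNat]) (by omega) hi ?_
            have hx : ((rem - u[i.toNat]).toNat + 1) * (u.length + 1) =
                (rem - u[i.toNat]).toNat * (u.length + 1) + (u.length + 1) := by ring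
            omega
          rw [ih2, hrev]
        · rw [if_neg hpr, dif_neg (by omega)]

-- the break loop of A processes exactly the usable prefix, as a fold
theorem pv_outer_eq_fold (n : Int) :
    ∀ (ps : List Int) (w : List Int),
      pvOuterLoop n ps w = (pvUsable n ps).foldl (fun w p => pvInnerLoop n p w) w := by
  intro ps
  induction ps with
  | nil => intro w; rfl
  | cons p ps ih =>
    intro w
    rw [pvOuterLoop, pvUsable]
    by_cases h : p > n
    · rw [if_pos h, if_pos h]; rfl
    · rw [if_neg h, if_neg h, List.foldl_cons, ih]

theorem pv_usable_eq_takeWhile (n : Int) :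
    ∀ ps : List Int, pvUsable n ps = ps.takeWhile (fun p => decide (p ≤ n)) := by
  intro ps
  induction ps with
  | nil => rfl
  | cons p ps ih =>
    rw [pvUsable, List.takeWhile_cons]
    by_cases h : p > n
    · rw [if_pos h]
      have : decide (p ≤ n) = false := by simp; omega
      simp [this]
    · rw [if_neg h]
      have : decide (p ≤ n) = true := by simp; omega
      simp [this, ih]

theorem pv_usable_le (n : Int) :
    ∀ ps : List Int, ∀ p ∈ pvUsable n ps, p ≤ n := by
  intro ps
  induction ps with
  | nil => intro p hp; simp [pvUsable] at hp
  | cons q qs ih =>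
    intro p hp
    rw [pvUsable] at hp
    by_cases h : q > n
    · rw [if_pos h] at hp; simp at hp
    · rw [if_neg h] at hp
      rcases List.mem_cons.mp hp with h1 | h2
      · omega
      · exact ih p h2

-- ===== VERDICT (by name: the statement is the Claim_ definition above) =====
theorem count_prime_summations_spec : Claim_equal_count_prime_summations := by
  intro n primes _hdom hpre
  obtain ⟨hn, hpos⟩ := hpre
  unfold Spec_count_prime_summations count_prime_summations count_prime_summations_alt
  simp only []
  set u := pvUsable n primes with hu
  have hu1 : ∀ p ∈ u, 1 ≤ p := by
    intro p hp
    exact hpos p (by rw [hu, pv_usable_eq_takeWhile] at hp; exact hp)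
  have huq : ∀ p ∈ u, 1 ≤ p ∧ p ≤ n := fun p hp => ⟨hu1 p hp, pv_usable_le n primes p hp⟩
  obtain ⟨_, hval⟩ := pv_fold_G n hn u huq
  rw [pv_outer_eq_fold, ← hu, hval n hn le_rfl]
  have hlen1 : ((u.length : Int) - 1) < (u.length : Int) := by omega
  have hfuel : (((u.length : Int) - 1) + 1).toNat + n.toNat * (u.length + 1) <
      (n.toNat + 1) * (u.length + 1) := by
    have h1 : (((u.length : Int) - 1) + 1).toNat = u.length := by omega
    have h2 : (n.toNat + 1) * (u.length + 1) = n.toNat * (u.length + 1) + (u.length + 1) := by ring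
    omega
  rw [pv_altCount_G u hu1 _ _ n hn hlen1 hfuel]
  have : (((u.length : Int) - 1) + 1).toNat = u.length := by omega
  rw [this, List.take_length]
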